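-- pv_equiv track=rewrite | github.com/miskibin/local-code | backend/app/commands/dispatcher.py | parse_slash
-- ===== SOURCE A (Python) =====
-- _NAME_CHARS = set("abcdefghijklmnopqrstuvwxyzABCDEFGHIJKLMNOPQRSTUVWXYZ0123456789_-")
--
-- def parse_slash(text: str) -> tuple[str, str] | None:
--     """Parse `/name [arg...]` from a free-form chat message.
--
--     Returns `(name, arg)` (arg may be empty) or `None` when text doesn't start
--     with a `/` followed by a valid name character. The leading `/` and any
--     trailing newline-prefixed continuation are honoured; only the first line
--     is parsed for the command name and its argument is the rest of the input
--     (including subsequent lines).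
--     """
--     if not text or not text.startswith("/"):
--         return None
--     body = text[1:]
--     if not body or body[0] not in _NAME_CHARS:
--         return None
--     i = 0
--     while i < len(body) and body[i] in _NAME_CHARS:
--         i += 1
--     name = body[:i]
--     rest = body[i:]
--     if rest.startswith((" ", "\n")):
--         rest = rest[1:]
--     elif rest:
--         return None
--     return name, rest.strip()
-- ===== SOURCE B (Python) =====
-- _NAME_CHARS = set("abcdefghijklmnopqrstuvwxyzABCDEFGHIJKLMNOPQRSTUVWXYZ0123456789_-")
--
--
-- def parse_slash(text: str) -> tuple[str, str] | None:
--     """Single-pass finite state machine: expect-slash / in-name / in-arg states,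
--     accumulating name and argument character by character (no slicing or index math)."""
--     state = 0  # 0 = expect '/', 1 = reading name, 2 = reading argument
--     name = []
--     arg = []
--     for ch in text:
--         if state == 0:
--             if ch != "/":
--                 return None
--             state = 1
--         elif state == 1:
--             if ch in _NAME_CHARS:
--                 name.append(ch)
--             elif (ch == " " or ch == "\n") and name:
--                 state = 2
--             else:
--                 return None
--         else:
--             arg.append(ch)
--     if not name:
--         return None
--     return "".join(name), "".join(arg).strip()
-- ===== Notes on version B (the rewrite author's own statement) =====
-- stated objective: alternative
-- what changed: Replaces A's slice/index bookkeeping (scan loop, body[:i]/body[i:] slices, startswith branch chain) with a single left-to-right finite state machine (expect-slash / in-name / in-arg) that accumulates the name and the argument character by character and rejects as soon as an invalid character is seen.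
import Mathlib
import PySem

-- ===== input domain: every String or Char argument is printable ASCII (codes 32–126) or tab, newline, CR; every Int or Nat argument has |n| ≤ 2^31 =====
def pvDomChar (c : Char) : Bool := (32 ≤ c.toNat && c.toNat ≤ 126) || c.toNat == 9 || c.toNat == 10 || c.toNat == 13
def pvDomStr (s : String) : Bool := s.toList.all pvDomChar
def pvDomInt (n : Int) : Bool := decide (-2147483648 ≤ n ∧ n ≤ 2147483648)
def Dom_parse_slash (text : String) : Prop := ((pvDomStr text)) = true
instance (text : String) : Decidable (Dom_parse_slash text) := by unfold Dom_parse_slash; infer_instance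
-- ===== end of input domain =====

-- B replaces A's scan-and-slice logic with a single-pass finite state machine (return-value equivalence).

-- the string literal _NAME_CHARS (shared constant of both Python versions)
def pvNAME : List Char := "abcdefghijklmnopqrstuvwxyzABCDEFGHIJKLMNOPQRSTUVWXYZ0123456789_-".toList

-- ===== PORT A =====
-- _NAME_CHARS = set("…")
def pvNameSet : PySem.Set Char := PySem.Set.ofList pvNAME

-- the `while i < len(body) and body[i] in _NAME_CHARS: i += 1` loop, as the obvious
-- structural recursion over the unscanned suffix carrying the counter i
def pvALoop : List Char → Nat → Nat
  | [], i => i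
  | c :: cs, i => if pvNameSet.contains c then pvALoop cs (i + 1) else i

def parse_slash (text : String) : Option (String × String) :=
  if text = "" || !(PySem.Str.startswith text "/") then none
  else
    let body := PySem.List.slice text.toList (some 1) none
    -- `not body or body[0] not in _NAME_CHARS`: body[0] read as headI under the
    -- nonemptiness guard (short-circuit), exact
    if body.isEmpty then none
    else if !(pvNameSet.contains body.headI) then none
    else
        let i := pvALoop body 0
        let name := PySem.List.slice body none (some (i : Int))
        let rest := PySem.List.slice body (some (i : Int)) none
        if PySem.Chars.startswith rest [' '] || PySem.Chars.startswith rest ['\n'] then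
          some (String.ofList name, String.ofList (PySem.Chars.strip (PySem.List.slice rest (some 1) none)))
        else if !rest.isEmpty then none
        else some (String.ofList name, String.ofList (PySem.Chars.strip rest))

-- ===== PORT B =====
-- state 2 of B's loop (`else: arg.append(ch)`): accumulate the argument characters
def pvBArg : List Char → List Char → List Char
  | [], arg => arg.reverse
  | c :: cs, arg => pvBArg cs (c :: arg)

-- state 1 of B's loop (`elif state == 1: …`), carrying the name accumulator; the
-- trailing `if not name: return None` is the nil case
def pvBName : List Char → List Char → Option (List Char × List Char)
  | [], name => if name.isEmpty then none else some (name.reverse, [])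
  | c :: cs, name =>
    if pvNameSet.contains c then pvBName cs (c :: name)
    else if (c = ' ' || c = '\n') && !name.isEmpty then some (name.reverse, pvBArg cs [])
    else none

def parse_slash_alt (text : String) : Option (String × String) :=
  match text.toList with
  | [] => none                      -- loop never runs, name empty → None
  | c :: cs =>
    if c = '/' then                  -- state 0: first character must be '/'
      match pvBName cs [] with
      | none => none
      | some (name, arg) => some (String.ofList name, String.ofList (PySem.Chars.strip arg))
    else none

-- ===== PRECONDITION & SPEC =====
def Spec_parse_slash (text : String) (out : Option (String × String)) : Prop := out = parse_slash_alt text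
instance (text : String) (out : Option (String × String)) : Decidable (Spec_parse_slash text out) := by unfold Spec_parse_slash; infer_instance

-- ===== CLAIM (what is proved, stated in full; the proofs are below) =====
def Claim_equal_parse_slash : Prop := ∀ (text : String), Dom_parse_slash text → Spec_parse_slash text (parse_slash text)

-- ===== LEMMAS AND PROOFS =====

theorem pvALoop_eq (cs : List Char) (i : Nat) :
    pvALoop cs i = i + (cs.takeWhile (fun c => pvNameSet.contains c)).length := by
  induction cs generalizing i with
  | nil => simp only [pvALoop, List.takeWhile_nil, List.length_nil, Nat.add_zero]
  | cons c cs ih =>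
    cases h : pvNameSet.contains c with
    | true =>
      simp only [pvALoop, h, if_true, List.takeWhile_cons, ih, List.length_cons]
      omega
    | false => simp only [pvALoop, h, Bool.false_eq_true, if_false, List.takeWhile_cons,
        List.length_nil, Nat.add_zero]

theorem pvFun : (fun x => decide (x ∈ pvNameSet)) = (fun x : Char => pvNameSet.contains x) := by
  funext x; simp

theorem pvTake_takeWhile (p : Char → Bool) (l : List Char) :
    l.take (l.takeWhile p).length = l.takeWhile p :=
  (List.prefix_iff_eq_take.mp (List.takeWhile_prefix p)).symm

theorem pvDrop_dropWhile (p : Char → Bool) (l : List Char) :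
    l.drop (l.takeWhile p).length = l.dropWhile p := by
  calc l.drop (l.takeWhile p).length
      = List.drop (l.takeWhile p).length (l.takeWhile p ++ l.dropWhile p) := by
        rw [List.takeWhile_append_dropWhile]
    _ = l.dropWhile p := List.drop_left

theorem pvBArg_eq (cs acc : List Char) : pvBArg cs acc = acc.reverse ++ cs := by
  induction cs generalizing acc with
  | nil => simp [pvBArg]
  | cons c cs ih => simp [pvBArg, ih]

theorem pvStartswith_cons (r0 : Char) (rtl : List Char) (c : Char) :
    PySem.Chars.startswith (r0 :: rtl) [c] = (r0 == c) := by
  simp [PySem.Chars.startswith, List.isPrefixOf, eq_comm]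

-- characterisation of B's state-1 loop once the name accumulator is nonempty
theorem pvBName_go (cs : List Char) (acc : List Char) (h : acc.isEmpty = false) :
    pvBName cs acc =
      match cs.dropWhile (fun x => pvNameSet.contains x) with
      | [] => some (acc.reverse ++ cs.takeWhile (fun x => pvNameSet.contains x), [])
      | r0 :: rtl =>
        if r0 = ' ' || r0 = '\n'
        then some (acc.reverse ++ cs.takeWhile (fun x => pvNameSet.contains x), rtl)
        else none := by
  induction cs generalizing acc with
  | nil => simp [pvBName, h]
  | cons c cs ih =>
    cases hc : pvNameSet.contains c with
    | true =>
      rw [List.dropWhile_cons_of_pos hc, List.takeWhile_cons_of_pos hc]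
      simp only [pvBName, hc, if_true]
      rw [ih (c :: acc) (by simp)]
      cases cs.dropWhile (fun x => pvNameSet.contains x) with
      | nil => simp only [List.reverse_cons, List.append_assoc, List.singleton_append]
      | cons r0 rtl => simp only [List.reverse_cons, List.append_assoc, List.singleton_append]
    | false =>
      rw [List.dropWhile_cons_of_neg (by simpa using hc), List.takeWhile_cons_of_neg (by simpa using hc)]
      simp only [pvBName, hc, Bool.false_eq_true, if_false, h, Bool.not_false, Bool.and_true,
        List.takeWhile_nil, List.append_nil]
      have hc' : c ∉ pvNameSet := by simpa using hc
      by_cases hsep : c = ' ' ∨ c = '\n'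
      · rcases hsep with h1 | h1 <;> simp [h1, hc', pvBArg_eq]
      · push Not at hsep
        simp [hsep.1, hsep.2]

-- ===== VERDICT (by name: the statement is the Claim_ definition above) =====
theorem parse_slash_spec : Claim_equal_parse_slash := by
  intro text _
  unfold Spec_parse_slash parse_slash parse_slash_alt
  cases htl : text.toList with
  | nil =>
    have : text = "" := by
      cases text with | _ d => cases d with | _ l => simp at htl; simp [htl]
    simp [this]
  | cons c cs =>
    have hne : ¬ (text = "") := by
      intro h; rw [h] at htl; simp at htl
    by_cases hslash : c = '/'
    · subst hslash
      have h0 : PySem.Str.startswith text "/" = true := by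
        rw [PySem.Str.startswith]
        simp only [htl]
        exact (PySem.Chars.startswith_iff _ _).mpr ⟨cs, by simp⟩
      simp only [h0, hne, Bool.not_true, decide_false, Bool.or_false, htl,
        PySem.List.slice_from_one, List.tail_cons, Bool.false_eq_true, if_false, if_true]
      cases cs with
      | nil => simp [pvBName, PySem.List.slice]
      | cons b bs =>
        cases hb : pvNameSet.contains b with
        | false =>
          simp only [List.headI_cons, hb, Bool.not_false, List.isEmpty_cons, if_true,
            Bool.false_eq_true, if_false]
          have hb' : b ∉ pvNameSet := by simpa using hb
          simp [pvBName, hb']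
        | true =>
          simp only [List.headI_cons, hb, Bool.not_true, List.isEmpty_cons, Bool.false_eq_true,
            if_false]
          rw [pvALoop_eq]
          simp only [Nat.zero_add]
          rw [PySem.List.slice_to_natCast, PySem.List.slice_from_natCast,
            pvTake_takeWhile, pvDrop_dropWhile]
          simp only [pvBName, hb, if_true]
          rw [pvBName_go bs [b] (by simp)]
          rw [List.takeWhile_cons_of_pos hb, List.dropWhile_cons_of_pos hb]
          cases hrest : bs.dropWhile (fun x => pvNameSet.contains x) with
          | nil =>
            simp [PySem.Chars.startswith]
            rw [pvFun]
          | cons r0 rtl =>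
            simp only [pvStartswith_cons, PySem.List.slice_from_one, List.tail_cons]
            by_cases hsp : r0 = ' '
            · simp [hsp]
              rw [pvFun]
            · by_cases hnl : r0 = '\n'
              · simp [hnl]
                rw [pvFun]
              · simp [hsp, hnl]
    · have hcs : PySem.Chars.startswith (c :: cs) ['/'] = false := by
        rw [pvStartswith_cons]
        simpa using hslash
      simp [PySem.Str.startswith, htl, hcs, hslash]
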